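-- pv_equiv track=rewrite | github.com/ozcodx/games_info | get_info.py | parse_debian_package_info
-- ===== SOURCE A (Python) =====
-- def parse_debian_package_info(package_info):
--     info_dict = {
--         'Description': '',
--         'Tags': '',
--         'Homepage': ''
--     }
--
--     lines = package_info.splitlines()
--     for line in lines:
--         if line.startswith('Description'):
--             info_dict['Description'] = line.split(' ', 1)[1]
--         elif line.startswith('Tags'):
--             info_dict['Tags'] = line.split(' ', 1)[1]
--         elif line.startswith('Homepage'):
--             info_dict['Homepage'] = line.split(' ', 1)[1]
--
--     return info_dict
-- ===== SOURCE B (Python) =====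
-- def parse_debian_package_info(package_info):
--     lines = package_info.splitlines()
--
--     def last_field(prefix):
--         value = ''
--         for line in lines:
--             if line.startswith(prefix):
--                 value = line.split(' ', 1)[1]
--         return value
--
--     return {field: last_field(field) for field in ('Description', 'Tags', 'Homepage')}
-- ===== Notes on version B (the rewrite author's own statement) =====
-- stated objective: alternative
-- what changed: Replaces A's single dispatching pass that mutates a three-key dict with a field-driven helper: one scan per field returning the last matching value, assembled by a dict comprehension.
import Mathlib
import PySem

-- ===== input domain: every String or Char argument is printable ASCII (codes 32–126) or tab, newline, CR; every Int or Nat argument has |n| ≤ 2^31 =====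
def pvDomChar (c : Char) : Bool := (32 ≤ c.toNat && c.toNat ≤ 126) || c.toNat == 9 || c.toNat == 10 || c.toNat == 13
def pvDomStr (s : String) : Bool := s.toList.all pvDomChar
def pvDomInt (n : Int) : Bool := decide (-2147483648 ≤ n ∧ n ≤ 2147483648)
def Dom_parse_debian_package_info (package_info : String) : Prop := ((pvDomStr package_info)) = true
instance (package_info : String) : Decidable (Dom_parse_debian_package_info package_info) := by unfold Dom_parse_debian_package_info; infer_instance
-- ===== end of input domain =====

-- B differs from A by decomposition: A makes one pass over the lines dispatching into a
-- mutable three-key dict; B scans once per field with a helper that keeps the last match.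

-- value after the first blank of the line; the .getD "" stands in for the IndexError, which Pre_ excludes
def pvTail (line : String) : String :=
  (PySem.List.pyGet? ((PySem.Str.splitMax? line " " 1).getD []) 1).getD ""

-- ===== PORT A =====
def parse_debian_package_info (package_info : String) : List (String × String) :=
  let init : PySem.Dict String String :=
    ((PySem.Dict.empty.insert "Description" "").insert "Tags" "").insert "Homepage" ""
  let lines := PySem.Str.splitlines package_info
  (lines.foldl (fun d line =>
    if PySem.Str.startswith line "Description" then d.insert "Description" (pvTail line)
    else if PySem.Str.startswith line "Tags" then d.insert "Tags" (pvTail line)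
    else if PySem.Str.startswith line "Homepage" then d.insert "Homepage" (pvTail line)
    else d) init).items

-- ===== PORT B =====
-- helper last_field: last value-after-first-blank among lines starting with prefix, else ''
def pvLastField (lines : List String) (pfx : String) : String :=
  lines.foldl (fun value line =>
    if PySem.Str.startswith line pfx then pvTail line else value) ""

def parse_debian_package_info_alt (package_info : String) : List (String × String) :=
  let lines := PySem.Str.splitlines package_info
  [("Description", pvLastField lines "Description"),
   ("Tags", pvLastField lines "Tags"),
   ("Homepage", pvLastField lines "Homepage")]

-- ===== PRECONDITION & SPEC =====
-- Pre_ excludes exactly the inputs where Python A raises IndexError: a line that starts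
-- with one of the three field names but contains no space (so splitting on the first blank yields no second part).
def Pre_parse_debian_package_info (package_info : String) : Prop :=
  ((PySem.Str.splitlines package_info).all (fun line =>
    !(PySem.Str.startswith line "Description" || PySem.Str.startswith line "Tags" ||
      PySem.Str.startswith line "Homepage") || PySem.Str.isIn " " line)) = true
instance (package_info : String) : Decidable (Pre_parse_debian_package_info package_info) := by
  unfold Pre_parse_debian_package_info; infer_instance

def pvWitness_parse_debian_package_info : String := "Description a b\nTags x\nHomepage h"

def Spec_parse_debian_package_info (package_info : String) (out : List (String × String)) : Prop := out = parse_debian_package_info_alt package_info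
instance (package_info : String) (out : List (String × String)) : Decidable (Spec_parse_debian_package_info package_info out) := by unfold Spec_parse_debian_package_info; infer_instance

-- ===== CLAIM (what is proved, stated in full; the proofs are below) =====
def Claim_equal_parse_debian_package_info : Prop := ∀ (package_info : String), Dom_parse_debian_package_info package_info → Pre_parse_debian_package_info package_info → Spec_parse_debian_package_info package_info (parse_debian_package_info package_info)

-- ===== LEMMAS AND PROOFS =====

-- the three field names are pairwise exclusive as prefixes (distinct first characters)
theorem pv_not_both {p q : String} (l : String)
    (hpq : p.toList.head? ≠ q.toList.head?) (hp : p.toList ≠ []) (hq : q.toList ≠ [])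
    (h1 : PySem.Str.startswith l p = true) : PySem.Str.startswith l q = true → False := by
  intro h2
  rw [PySem.Str.startswith_eq, PySem.Chars.startswith_iff] at h1 h2
  obtain ⟨t1, e1⟩ := h1
  obtain ⟨t2, e2⟩ := h2
  cases hp' : p.toList with
  | nil => exact hp hp'
  | cons a as =>
    cases hq' : q.toList with
    | nil => exact hq hq'
    | cons b bs =>
      rw [hp'] at e1; rw [hq'] at e2
      have hab : a = b := by
        have h := e1.trans e2.symm
        simp only [List.cons_append, List.cons.injEq] at h
        exact h.1
      exact hpq (by rw [hp', hq', hab]; rfl)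

-- core invariant: A's dict fold, started at any three values, ends at the three last-field folds
theorem pv_core (lines : List String) (d t h : String) :
    (lines.foldl (fun d line =>
      if PySem.Str.startswith line "Description" then d.insert "Description" (pvTail line)
      else if PySem.Str.startswith line "Tags" then d.insert "Tags" (pvTail line)
      else if PySem.Str.startswith line "Homepage" then d.insert "Homepage" (pvTail line)
      else d) (PySem.Dict.mk [("Description", d), ("Tags", t), ("Homepage", h)])).items =
    [("Description", lines.foldl (fun v l => if PySem.Str.startswith l "Description" then pvTail l else v) d),
     ("Tags", lines.foldl (fun v l => if PySem.Str.startswith l "Tags" then pvTail l else v) t),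
     ("Homepage", lines.foldl (fun v l => if PySem.Str.startswith l "Homepage" then pvTail l else v) h)] := by
  induction lines generalizing d t h with
  | nil => simp
  | cons l ls ih =>
    by_cases hD : PySem.Str.startswith l "Description" = true
    · have hT : PySem.Str.startswith l "Tags" = false :=
        Bool.eq_false_iff.mpr (fun hc => pv_not_both (q := "Tags") l (by decide) (by decide) (by decide) hD hc)
      have hH : PySem.Str.startswith l "Homepage" = false :=
        Bool.eq_false_iff.mpr (fun hc => pv_not_both (q := "Homepage") l (by decide) (by decide) (by decide) hD hc)
      simp only [List.foldl_cons, hD, hT, hH, if_true]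
      have : (PySem.Dict.mk [("Description", d), ("Tags", t), ("Homepage", h)]).insert "Description" (pvTail l)
           = PySem.Dict.mk [("Description", pvTail l), ("Tags", t), ("Homepage", h)] := by simp [PySem.Dict.insert]
      rw [this]; exact ih _ _ _
    · by_cases hT : PySem.Str.startswith l "Tags" = true
      · have hH : PySem.Str.startswith l "Homepage" = false :=
          Bool.eq_false_iff.mpr (fun hc => pv_not_both (q := "Homepage") l (by decide) (by decide) (by decide) hT hc)
        simp only [List.foldl_cons, hD, hT, hH, if_true]
        have : (PySem.Dict.mk [("Description", d), ("Tags", t), ("Homepage", h)]).insert "Tags" (pvTail l)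
             = PySem.Dict.mk [("Description", d), ("Tags", pvTail l), ("Homepage", h)] := by simp [PySem.Dict.insert]
        rw [this]; exact ih _ _ _
      · by_cases hH : PySem.Str.startswith l "Homepage" = true
        · simp only [List.foldl_cons, hD, hT, hH, if_true]
          have : (PySem.Dict.mk [("Description", d), ("Tags", t), ("Homepage", h)]).insert "Homepage" (pvTail l)
               = PySem.Dict.mk [("Description", d), ("Tags", t), ("Homepage", pvTail l)] := by simp [PySem.Dict.insert]
          rw [this]; exact ih _ _ _
        · simp only [List.foldl_cons, hD, hT, hH]
          exact ih _ _ _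

-- ===== VERDICT (by name: the statement is the Claim_ definition above) =====
theorem parse_debian_package_info_spec : Claim_equal_parse_debian_package_info := by
  intro s _ _
  unfold Spec_parse_debian_package_info parse_debian_package_info parse_debian_package_info_alt pvLastField
  have hinit : ((PySem.Dict.empty.insert "Description" "").insert "Tags" "").insert "Homepage" ""
      = PySem.Dict.mk [("Description", ""), ("Tags", ""), ("Homepage", "")] := by decide
  simp only [hinit]
  exact pv_core (PySem.Str.splitlines s) "" "" ""
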